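-- pv_equiv track=rewrite | github.com/dhiraj9087/CP | codechef/maxhamming.py | max_hamming_distance_sum
-- ===== SOURCE A (Python) =====
-- def max_hamming_distance_sum(strings):
--     M = len(strings)
--     N = len(strings[0])
--
--     # Count '0's, '1's, and '?'s for each position
--     counts = [{'0': 0, '1': 0, '?': 0} for _ in range(N)]
--     for s in strings:
--         for i, c in enumerate(s):
--             counts[i][c] += 1
--
--     total_distance = 0
--     for i in range(N):
--         zeros = counts[i]['0']
--         ones = counts[i]['1']
--         questions = counts[i]['?']
--
--         # Try all possible ways to distribute the '?'s
--         max_diff = 0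
--         for additional_zeros in range(questions + 1):
--             total_zeros = zeros + additional_zeros
--             total_ones = ones + (questions - additional_zeros)
--             diff = total_zeros * total_ones
--             max_diff = max(max_diff, diff)
--
--         total_distance += max_diff
--
--     return total_distance
-- ===== SOURCE B (Python) =====
-- def max_hamming_distance_sum(strings):
--     N = len(strings[0])
--     total = 0
--     for i in range(N):
--         cnt = {'0': 0, '1': 0, '?': 0}
--         for s in strings:
--             if i < len(s):
--                 cnt[s[i]] += 1
--         T = cnt['0'] + cnt['1'] + cnt['?']
--         x = min(max(T // 2, cnt['0']), cnt['0'] + cnt['?'])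
--         total += x * (T - x)
--     return total
-- ===== Notes on version B (the rewrite author's own statement) =====
-- stated objective: alternative
-- what changed: Instead of A's table of per-position dicts built over all strings followed by an O(questions) enumeration of every '?'-split per column, B processes one column at a time (loop order inverted) and replaces the whole inner enumeration by the closed-form optimum x = min(max(T//2, zeros), zeros+questions) of the concave product x*(T-x).
import Mathlib
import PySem

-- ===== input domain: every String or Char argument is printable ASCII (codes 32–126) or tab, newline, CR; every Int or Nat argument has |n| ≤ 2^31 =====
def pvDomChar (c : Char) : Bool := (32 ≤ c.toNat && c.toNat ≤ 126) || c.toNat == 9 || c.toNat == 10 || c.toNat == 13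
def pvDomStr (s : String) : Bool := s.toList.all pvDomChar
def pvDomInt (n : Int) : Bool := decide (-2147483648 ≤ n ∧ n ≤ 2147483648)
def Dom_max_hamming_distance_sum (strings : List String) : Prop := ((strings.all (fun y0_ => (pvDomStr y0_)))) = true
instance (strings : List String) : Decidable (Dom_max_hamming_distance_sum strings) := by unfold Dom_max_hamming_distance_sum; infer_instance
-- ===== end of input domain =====

-- B replaces A's per-position dict table and per-column enumeration of '?'-splits by direct
-- per-column counting and a closed-form optimum (objective: alternative algorithm, similar cost).

-- ===== PORT A =====
-- the dict literal {'0': 0, '1': 0, '?': 0}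
def pvInitDict : PySem.Dict Char Int := PySem.Dict.ofList [('0', 0), ('1', 0), ('?', 0)]

-- counts[i][c] += 1 (KeyError/IndexError cases are excluded by Pre_; the getD/pySetD
-- totalisation is exact on Pre_)
def pvBumpAt (counts : List (PySem.Dict Char Int)) (i : Int) (c : Char) :
    List (PySem.Dict Char Int) :=
  let d := PySem.List.pyGetD counts i (PySem.Dict.ofList [])
  PySem.List.pySetD counts i (d.insert c (d.getD c 0 + 1))

def max_hamming_distance_sum (strings : List String) : Int :=
  let _M : Int := strings.length
  let N : Int := PySem.Str.len (PySem.List.pyGetD strings 0 "")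
  -- counts = [{'0': 0, '1': 0, '?': 0} for _ in range(N)]
  let counts := (PySem.List.pyRange 0 N).map (fun _ => pvInitDict)
  -- for s in strings: for i, c in enumerate(s): counts[i][c] += 1
  let counts := strings.foldl
    (fun counts s =>
      (PySem.List.enumerate s.toList).foldl (fun counts ic => pvBumpAt counts ic.1 ic.2) counts)
    counts
  (PySem.List.pyRange 0 N).foldl
    (fun total_distance i =>
      let d := PySem.List.pyGetD counts i (PySem.Dict.ofList [])
      let zeros := d.getD '0' 0
      let ones := d.getD '1' 0
      let questions := d.getD '?' 0
      let max_diff := (PySem.List.pyRange 0 (questions + 1)).foldl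
        (fun max_diff additional_zeros =>
          max max_diff ((zeros + additional_zeros) * (ones + (questions - additional_zeros))))
        0
      total_distance + max_diff)
    0

-- ===== PORT B =====
def max_hamming_distance_sum_alt (strings : List String) : Int :=
  let N : Int := PySem.Str.len (PySem.List.pyGetD strings 0 "")
  (PySem.List.pyRange 0 N).foldl
    (fun total i =>
      -- cnt = {'0': 0, '1': 0, '?': 0}; for s in strings: if i < len(s): cnt[s[i]] += 1
      -- (the .getD ' ' totalisation of s[i] is exact: it is guarded by i < len(s) and 0 ≤ i;
      --  cnt[c] += 1 raises KeyError outside '01?', which Pre_ excludes)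
      let cnt := strings.foldl
        (fun (cnt : PySem.Dict Char Int) s =>
          if i < PySem.Str.len s then
            cnt.insert ((PySem.Str.pyGet? s i).getD ' ')
              (cnt.getD ((PySem.Str.pyGet? s i).getD ' ') 0 + 1)
          else cnt)
        (PySem.Dict.ofList [('0', 0), ('1', 0), ('?', 0)])
      let T := cnt.getD '0' 0 + cnt.getD '1' 0 + cnt.getD '?' 0
      let x := min (max (PySem.Int.floordiv T 2) (cnt.getD '0' 0)) (cnt.getD '0' 0 + cnt.getD '?' 0)
      total + x * (T - x))
    0

-- ===== PRECONDITION & SPEC =====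
-- Pre_ excludes exactly the inputs where A raises: the empty list (IndexError on strings[0]),
-- a string longer than the first (IndexError on counts[i]) and characters outside '01?' (KeyError).
def Pre_max_hamming_distance_sum (strings : List String) : Prop :=
  strings ≠ [] ∧ (strings.all (fun s =>
    decide (PySem.Str.len s ≤ PySem.Str.len (strings.headD "")) &&
    s.toList.all (fun c => c == '0' || c == '1' || c == '?'))) = true
instance (strings : List String) : Decidable (Pre_max_hamming_distance_sum strings) := by
  unfold Pre_max_hamming_distance_sum; infer_instance

def pvWitness_max_hamming_distance_sum : List String := (["01?", "1?0", "??1"])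

def Spec_max_hamming_distance_sum (strings : List String) (out : Int) : Prop :=
  out = max_hamming_distance_sum_alt strings
instance (strings : List String) (out : Int) : Decidable (Spec_max_hamming_distance_sum strings out) := by
  unfold Spec_max_hamming_distance_sum; infer_instance

-- ===== CLAIM (what is proved, stated in full; the proofs are below) =====
def Claim_equal_max_hamming_distance_sum : Prop := ∀ (strings : List String), Dom_max_hamming_distance_sum strings → Pre_max_hamming_distance_sum strings → Spec_max_hamming_distance_sum strings (max_hamming_distance_sum strings)

-- ===== LEMMAS AND PROOFS =====

-- unpack the Bool-level Pre_ into the Prop facts the proofs use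
lemma pvPre_unpack (strings : List String)
    (h : Pre_max_hamming_distance_sum strings) :
    strings ≠ [] ∧ ∀ s ∈ strings,
      PySem.Str.len s ≤ PySem.Str.len (strings.headD "") ∧
      ∀ c ∈ s.toList, c = '0' ∨ c = '1' ∨ c = '?' := by
  obtain ⟨hne, hb⟩ := h
  refine ⟨hne, fun s hs => ?_⟩
  have h1 := List.all_eq_true.mp hb s hs
  rw [Bool.and_eq_true] at h1
  refine ⟨of_decide_eq_true h1.1, fun c hc => ?_⟩
  have h2 := List.all_eq_true.mp h1.2 c hc
  have h3 := h2
  simp [Bool.or_eq_true, beq_iff_eq] at h3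
  tauto

-- number of strings whose k-th character is c (the common yardstick both ports are reduced to)
def pvCnt (strings : List String) (k : Nat) (c : Char) : Int :=
  (strings.countP (fun s => s.toList[k]? == some c) : Nat)

lemma pvCnt_nonneg (strings : List String) (k : Nat) (c : Char) : 0 ≤ pvCnt strings k c := by
  simp [pvCnt]

lemma pvCnt_cons (s : String) (ss : List String) (k : Nat) (c : Char) :
    pvCnt (s :: ss) k c = pvCnt ss k c + (if s.toList[k]? = some c then 1 else 0) := by
  simp only [pvCnt, List.countP_cons]
  split <;> simp_all

lemma pvInitDict_getD (c : Char) : pvInitDict.getD c 0 = 0 := by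
  simp [pvInitDict, PySem.Dict.ofList, PySem.Dict.getD, PySem.Dict.get?, PySem.Dict.empty,
        PySem.Dict.update, PySem.Dict.insert, PySem.Dict.contains, List.find?]
  rcases h0 : ('0' == c) <;> rcases h1 : ('1' == c) <;> rcases h2 : ('?' == c) <;>
    simp [h0, h1, h2, List.find?]

-- getD after a bump of key c: old value plus 1 iff the key matches
lemma pvBump_getD (d : PySem.Dict Char Int) (c c' : Char) :
    (d.insert c (d.getD c 0 + 1)).getD c' 0 = d.getD c' 0 + (if c' = c then 1 else 0) := by
  rw [PySem.Dict.getD_insert]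
  split <;> simp_all

lemma pvBumpAt_length (counts : List (PySem.Dict Char Int)) (i : Int) (c : Char) :
    (pvBumpAt counts i c).length = counts.length := by
  simp [pvBumpAt, PySem.List.length_pySetD]

-- effect of one string's enumerate-loop on the table, read back entry-wise
lemma pvStringUpd (cs : List Char) :
    ∀ (counts : List (PySem.Dict Char Int)) (j : Nat), cs.length + j ≤ counts.length →
    ∀ (k : Nat), k < counts.length → ∀ (c' : Char),
    (PySem.List.pyGetD
        ((PySem.List.enumerate cs (j : Int)).foldl (fun counts ic => pvBumpAt counts ic.1 ic.2) counts)
        (k : Int) (PySem.Dict.ofList [])).getD c' 0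
      = (PySem.List.pyGetD counts (k : Int) (PySem.Dict.ofList [])).getD c' 0
        + (if j ≤ k ∧ cs[k - j]? = some c' then 1 else 0) := by
  induction cs with
  | nil =>
    intro counts j _ k _ c'
    simp [PySem.List.enumerate]
  | cons c cs ih =>
    intro counts j h k hk c'
    rw [PySem.List.enumerate_cons]
    simp only [List.foldl_cons]
    have hj : j < counts.length := by simp at h; omega
    have hlen : (pvBumpAt counts (j : Int) c).length = counts.length := pvBumpAt_length _ _ _
    have hcast : (j : Int) + 1 = ((j + 1 : Nat) : Int) := by push_cast; ring
    rw [hcast, ih (pvBumpAt counts (j : Int) c) (j + 1) (by simp at h ⊢; omega ) k (by omega) c']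
    have hbump : PySem.List.pyGetD (pvBumpAt counts (j : Int) c) (k : Int) (PySem.Dict.ofList [])
        = if k = j
          then (PySem.List.pyGetD counts (j : Int) (PySem.Dict.ofList [])).insert c
                 ((PySem.List.pyGetD counts (j : Int) (PySem.Dict.ofList [])).getD c 0 + 1)
          else PySem.List.pyGetD counts (k : Int) (PySem.Dict.ofList []) := by
      unfold pvBumpAt
      exact PySem.List.pyGetD_pySetD_natCast counts j k _ _ hj
    by_cases hkj : k = j
    · subst hkj
      rw [hbump, if_pos rfl, pvBump_getD]
      have h2 : (k ≤ k ∧ (c :: cs)[k - k]? = some c') ↔ (c' = c) := by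
        simp [Nat.sub_self, eq_comm]
      have h1 : ¬ (k + 1 ≤ k ∧ cs[k - (k + 1)]? = some c') := fun h => by omega
      rw [if_neg h1]
      by_cases hc : c' = c
      · rw [if_pos hc, if_pos (h2.mpr hc)]; ring
      · rw [if_neg hc, if_neg (fun h => hc (h2.mp h))]; ring
    · rw [hbump, if_neg hkj]
      congr 1
      rcases Nat.lt_or_ge k j with hlt | hge
      · have hn1 : ¬ (j ≤ k) := by omega
        have hn2 : ¬ (j + 1 ≤ k) := by omega
        rw [if_neg (fun h => hn2 h.1), if_neg (fun h => hn1 h.1)]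
      · have hgt : j < k := by omega
        have e1 : k - j = (k - (j + 1)) + 1 := by omega
        have e2 : (c :: cs)[(k - (j + 1)) + 1]? = cs[k - (j + 1)]? := by simp
        rw [e1, e2]
        have : (j + 1 ≤ k) ↔ (j ≤ k) := by omega
        simp [this]

lemma pvStringUpd_length (cs : List Char) :
    ∀ (counts : List (PySem.Dict Char Int)) (j : Int),
    ((PySem.List.enumerate cs j).foldl (fun counts ic => pvBumpAt counts ic.1 ic.2) counts).length
      = counts.length := by
  induction cs with
  | nil => intro counts j; simp [PySem.List.enumerate]
  | cons c cs ih =>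
    intro counts j
    rw [PySem.List.enumerate_cons]
    simp only [List.foldl_cons]
    rw [ih, pvBumpAt_length]

-- the whole table-building double loop of A, read back entry-wise
lemma pvBuild (ss : List String) :
    ∀ (counts : List (PySem.Dict Char Int)),
    (∀ s ∈ ss, s.toList.length ≤ counts.length) →
    ∀ (k : Nat), k < counts.length → ∀ (c' : Char),
    (PySem.List.pyGetD
        (ss.foldl (fun counts s =>
          (PySem.List.enumerate s.toList).foldl (fun counts ic => pvBumpAt counts ic.1 ic.2) counts) counts)
        (k : Int) (PySem.Dict.ofList [])).getD c' 0
      = (PySem.List.pyGetD counts (k : Int) (PySem.Dict.ofList [])).getD c' 0 + pvCnt ss k c' := by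
  induction ss with
  | nil => intro counts _ k _ c'; simp [pvCnt]
  | cons s ss ih =>
    intro counts h k hk c'
    simp only [List.foldl_cons]
    have hlen0 := pvStringUpd_length s.toList counts 0
    rw [ih _ (by intro s' hs'; rw [hlen0]; exact h s' (List.mem_cons_of_mem _ hs'))
          k (by omega) c']
    have hsu := pvStringUpd s.toList counts 0 (by simpa using h s (List.mem_cons_self)) k hk c'
    rw [Nat.cast_zero] at hsu
    rw [hsu]
    rw [pvCnt_cons]
    simp only [Nat.zero_le, true_and, Nat.sub_zero]
    ring

-- B's inner counting loop: the column dict, read at any key, counts that character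
lemma pvColDict (ss : List String) (i : Nat) :
    ∀ (d : PySem.Dict Char Int) (c' : Char),
    (ss.foldl
      (fun (cnt : PySem.Dict Char Int) s =>
        if (i : Int) < PySem.Str.len s then
          cnt.insert ((PySem.Str.pyGet? s (i : Int)).getD ' ')
            (cnt.getD ((PySem.Str.pyGet? s (i : Int)).getD ' ') 0 + 1)
        else cnt) d).getD c' 0
      = d.getD c' 0 + pvCnt ss i c' := by
  induction ss with
  | nil => intro d c'; simp [pvCnt]
  | cons s ss ih =>
    intro d c'
    simp only [List.foldl_cons]
    by_cases hi : i < s.toList.length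
    · have hcond : (i : Int) < PySem.Str.len s := by
        rw [PySem.Str.len_eq]; exact_mod_cast hi
      have hget : (PySem.Str.pyGet? s (i : Int)).getD ' ' = s.toList[i] := by
        rw [PySem.Str.pyGet?_natCast, List.getElem?_eq_getElem hi]; rfl
      have hsome : s.toList[i]? = some (s.toList[i]) := List.getElem?_eq_getElem hi
      rw [if_pos hcond]
      simp only [hget]
      rw [ih, pvBump_getD, pvCnt_cons, hsome]
      by_cases hc : c' = s.toList[i]
      · rw [if_pos hc, if_pos (congrArg some hc.symm)]; ring
      · rw [if_neg hc, if_neg (fun h => hc (Option.some.inj h).symm)]; ring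
    · have hcond : ¬ ((i : Int) < PySem.Str.len s) := by
        rw [PySem.Str.len_eq]; exact_mod_cast hi
      have hnone : s.toList[i]? = none := List.getElem?_eq_none (by omega)
      rw [if_neg hcond, ih, pvCnt_cons, hnone]
      simp

-- closed form of A's inner maximisation: x*(T-x) is concave, so the best integer split is the
-- clamp of T//2 into [zeros, zeros+questions]
lemma pvOpt (z o q : Int) (hz : 0 ≤ z) (ho : 0 ≤ o) (hq : 0 ≤ q) :
    (PySem.List.pyRange 0 (q + 1)).foldl
      (fun m a => max m ((z + a) * (o + (q - a)))) 0
      = (min (max (PySem.Int.floordiv (z + o + q) 2) z) (z + q))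
        * ((z + o + q) - min (max (PySem.Int.floordiv (z + o + q) 2) z) (z + q)) := by
  have hfd : PySem.Int.floordiv (z + o + q) 2 = (z + o + q) / 2 :=
    PySem.Int.floordiv_eq_ediv_of_pos (by norm_num)
  rw [hfd]
  set T := z + o + q with hT
  set m := T / 2 with hm
  have hmT : 2 * m ≤ T ∧ T ≤ 2 * m + 1 := by omega
  set x := min (max m z) (z + q) with hx
  have hxlo : z ≤ x := by
    rcases le_total m z with h | h
    · rw [hx, max_eq_right h]; exact le_min (le_refl z) (by omega)
    · rw [hx, max_eq_left h]; exact le_min h (by omega)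
  have hxhi : x ≤ z + q := min_le_right _ _
  have key : ∀ a : Int, 0 ≤ a → a < q + 1 → (z + a) * (o + (q - a)) ≤ x * (T - x) := by
    intro a ha0 haq
    set y := z + a with hy
    have hylo : z ≤ y := by omega
    have hyhi : y ≤ z + q := by omega
    have hval : o + (q - a) = T - y := by omega
    rw [hval]
    rcases le_or_gt m z with hmz | hzm
    · have hxz : x = z := by rw [hx, max_eq_right hmz, min_eq_left (by omega)]
      rw [hxz]
      rcases eq_or_lt_of_le hylo with heq | hlt
      · rw [← heq]
      · have k1 : (0 : Int) ≤ y - z := by omega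
        have k2 : (0 : Int) ≤ z + y - T := by omega
        nlinarith [mul_nonneg k1 k2]
    · rcases le_or_gt (z + q) m with hqm | hmq
      · have hxz : x = z + q := by rw [hx, max_eq_left (le_of_lt hzm), min_eq_right hqm]
        rw [hxz]
        have k1 : (0 : Int) ≤ z + q - y := by omega
        have k2 : (0 : Int) ≤ T - (z + q) - y := by omega
        nlinarith [mul_nonneg k1 k2]
      · have hxz : x = m := by rw [hx, max_eq_left (le_of_lt hzm), min_eq_left (le_of_lt hmq)]
        rw [hxz]
        rcases le_or_gt y m with hym | hmy
        · have k1 : (0 : Int) ≤ m - y := by omega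
          have k2 : (0 : Int) ≤ T - m - y := by omega
          nlinarith [mul_nonneg k1 k2]
        · have k1 : (0 : Int) ≤ y - m := by omega
          have k2 : (0 : Int) ≤ m + y - T := by omega
          nlinarith [mul_nonneg k1 k2]
  apply le_antisymm
  · rw [← List.foldl_map]
    rcases PySem.List.foldl_max_mem ((PySem.List.pyRange 0 (q + 1)).map
        (fun a => (z + a) * (o + (q - a)))) 0 with h | h
    · rw [h]
      exact mul_nonneg (by omega) (by omega)
    · obtain ⟨a, ha, hfa⟩ := List.mem_map.mp h
      rw [← hfa]
      obtain ⟨ha0, haq⟩ := PySem.List.mem_pyRange_one.mp ha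
      exact key a ha0 haq
  · have hmem : x - z ∈ PySem.List.pyRange 0 (q + 1) :=
      PySem.List.mem_pyRange_one.mpr ⟨by omega, by omega⟩
    have hle := (PySem.List.le_foldl_max_int (PySem.List.pyRange 0 (q + 1))
        (fun a => (z + a) * (o + (q - a))) 0).2 (x - z) hmem
    have heq : (z + (x - z)) * (o + (q - (x - z))) = x * (T - x) := by rw [hT]; ring
    rw [heq] at hle
    exact hle

-- ===== VERDICT (by name: the statement is the Claim_ definition above) =====
theorem max_hamming_distance_sum_spec : Claim_equal_max_hamming_distance_sum := by
  intro strings _ hpre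
  obtain ⟨hne, hall⟩ := pvPre_unpack strings hpre
  unfold Spec_max_hamming_distance_sum
  match strings, hne, hall with
  | s0 :: rest, _, hall =>
  simp only [max_hamming_distance_sum, max_hamming_distance_sum_alt,
    PySem.List.pyGetD_zero_cons]
  apply PySem.List.foldl_congr_mem
  intro acc i hi
  obtain ⟨hi0, hin⟩ := PySem.List.mem_pyRange_one.mp hi
  rw [PySem.Str.len_eq] at hin
  have hik : ((i.toNat : Nat) : Int) = i := Int.toNat_of_nonneg hi0
  have hkn : i.toNat < s0.toList.length := by omega
  have hlc0 : ((PySem.List.pyRange 0 (PySem.Str.len s0)).map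
      (fun _ => pvInitDict)).length = s0.toList.length := by
    rw [PySem.Str.len_eq, PySem.List.pyRange_zero_natCast]; simp
  have hlens : ∀ s ∈ s0 :: rest, s.toList.length ≤ ((PySem.List.pyRange 0 (PySem.Str.len s0)).map
      (fun _ => pvInitDict)).length := by
    intro s hs
    rw [hlc0]
    have h1 := (hall s hs).1
    rw [PySem.Str.len_eq, List.headD_cons, PySem.Str.len_eq] at h1
    exact_mod_cast h1
  have hinit : ∀ c, (PySem.List.pyGetD ((PySem.List.pyRange 0 (PySem.Str.len s0)).map
      (fun _ => pvInitDict)) ((i.toNat : Nat) : Int) (PySem.Dict.ofList [])).getD c 0 = 0 := by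
    intro c
    have hget : ((PySem.List.pyRange 0 (PySem.Str.len s0)).map
        (fun _ => pvInitDict))[i.toNat]? = some pvInitDict := by
      rw [PySem.Str.len_eq, PySem.List.pyRange_zero_natCast]
      have hkn' : i.toNat < s0.length := by simpa using hkn
      simp [List.getElem?_map, List.getElem?_range, hkn']
    rw [PySem.List.pyGetD_natCast, List.getD_eq_getElem?_getD, hget]
    exact pvInitDict_getD c
  have hA : ∀ c, (PySem.List.pyGetD
      ((s0 :: rest).foldl (fun counts s =>
        (PySem.List.enumerate s.toList).foldl (fun counts ic => pvBumpAt counts ic.1 ic.2) counts)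
        ((PySem.List.pyRange 0 (PySem.Str.len s0)).map (fun _ => pvInitDict)))
      ((i.toNat : Nat) : Int) (PySem.Dict.ofList [])).getD c 0 = pvCnt (s0 :: rest) i.toNat c := by
    intro c
    rw [pvBuild (s0 :: rest) _ hlens i.toNat (by omega) c, hinit c, zero_add]
  have hz : ∀ c', (PySem.Dict.ofList [('0', (0 : Int)), ('1', 0), ('?', 0)]).getD c' 0 = 0 :=
    fun c' => pvInitDict_getD c'
  rw [← hik]
  rw [hA '0', hA '1', hA '?']
  simp only [pvColDict (s0 :: rest) i.toNat, hz, zero_add]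
  rw [pvOpt (pvCnt (s0 :: rest) i.toNat '0') (pvCnt (s0 :: rest) i.toNat '1')
      (pvCnt (s0 :: rest) i.toNat '?') (pvCnt_nonneg _ _ _) (pvCnt_nonneg _ _ _) (pvCnt_nonneg _ _ _)]
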